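-- pv_equiv track=rewrite | github.com/boojang/ktb-2-coding-test-study | Semi/12주차/[1]가장많이받은선물.py | get_gift_index
-- ===== SOURCE A (Python) =====
-- def get_gift_index(gift_status):
--     n = len(gift_status)
--     gift_index = []
--     cols = list(zip(*gift_status))
--
--     for i in range(n):
--         given =sum(gift_status[i])
--         # received =sum(cols[i])
--         received = sum(gift_status[j][i] for j in range(n))
--         gift_index.append(given-received)
--
--     return gift_index
-- ===== SOURCE B (Python) =====
-- def get_gift_index(gift_status):
--     # Antisymmetric pairwise accumulation: gift_index[i] = sum_j (g[i][j] - g[j][i]).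
--     # Iterate only over unordered pairs i < j; each difference d = g[i][j] - g[j][i]
--     # is credited to i and debited from j (the diagonal contributes nothing).
--     # Visits each off-diagonal pair once instead of summing every row and column.
--     n = len(gift_status)
--     out = [0] * n
--     for i in range(n):
--         for j in range(i + 1, n):
--             d = gift_status[i][j] - gift_status[j][i]
--             out[i] += d
--             out[j] -= d
--     return out
-- ===== Notes on version B (the rewrite author's own statement) =====
-- stated objective: alternative
-- what changed: A computes each person's full row sum and then rescans their column with an inner generator; B never forms row or column sums: it walks only the strict upper triangle, once per unordered pair, and pushes the antisymmetric difference g[i][j]-g[j][i] onto both endpoints (+d to i, -d to j), reading each off-diagonal cell once and the diagonal never.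
-- outside the precondition, e.g. on get_gift_index([[1, 2, 3], [4, 5, 6]]): A returns [1, 8], B returns [-2, 2]
import Mathlib
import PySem

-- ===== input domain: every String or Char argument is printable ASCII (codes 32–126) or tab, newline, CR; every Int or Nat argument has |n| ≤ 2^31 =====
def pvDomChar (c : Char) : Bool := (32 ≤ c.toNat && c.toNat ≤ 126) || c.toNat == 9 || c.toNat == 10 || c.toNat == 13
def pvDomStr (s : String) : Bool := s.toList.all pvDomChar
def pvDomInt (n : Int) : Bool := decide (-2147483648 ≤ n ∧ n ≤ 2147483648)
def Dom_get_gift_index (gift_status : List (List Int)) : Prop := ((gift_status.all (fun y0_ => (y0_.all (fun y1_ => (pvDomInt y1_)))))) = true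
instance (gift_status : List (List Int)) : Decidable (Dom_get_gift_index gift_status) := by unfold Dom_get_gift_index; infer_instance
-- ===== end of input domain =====

-- B replaces A's per-person "sum row i, then rescan column i" by a walk over the strict upper
-- triangle that pushes each antisymmetric difference g[i][j] - g[j][i] onto both endpoints
-- (+d to person i, -d to person j); no row or column sum is ever formed (alternative algorithm).

-- ===== PORT A =====
-- (A also binds 'cols = list(zip(*gift_status))' and never uses it; the dead binding is omitted.)
def get_gift_index (gift_status : List (List Int)) : List Int :=
  let n : Int := gift_status.length
  (PySem.List.pyRange 0 n 1).foldl (fun acc i =>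
    let given := (PySem.List.pyGetD gift_status i []).sum
    let received := ((PySem.List.pyRange 0 n 1).map (fun j =>
      PySem.List.pyGetD (PySem.List.pyGetD gift_status j []) i 0)).sum
    acc ++ [given - received]) []

-- ===== PORT B =====
-- body of B's inner loop: d = g[i][j] - g[j][i]; out[i] += d; out[j] -= d
def pvUpd (g : List (List Int)) (out : List Int) (i j : Nat) : List Int :=
  let d := PySem.List.pyGetD (PySem.List.pyGetD g (i : Int) []) (j : Int) 0
         - PySem.List.pyGetD (PySem.List.pyGetD g (j : Int) []) (i : Int) 0
  let o1 := out.set i (out.getD i 0 + d)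
  o1.set j (o1.getD j 0 - d)

def get_gift_index_alt (gift_status : List (List Int)) : List Int :=
  let n := gift_status.length
  (List.range n).foldl (fun out i =>
    (List.range' (i + 1) (n - (i + 1))).foldl (fun out j => pvUpd gift_status out i j) out)
    (List.replicate n 0)

-- ===== PRECONDITION & SPEC =====
-- Pre_ restricts to the task's natural domain, square n×n matrices: on ragged inputs A either
-- raises IndexError (a row shorter than n) or, for a row longer than n, its full-row sum counts
-- entries beyond column n-1 that no column sum ever sees — an artefact no one would specify.
def Pre_get_gift_index (gift_status : List (List Int)) : Prop :=
  ∀ r ∈ gift_status, r.length = gift_status.length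
instance (gift_status : List (List Int)) : Decidable (Pre_get_gift_index gift_status) := by
  unfold Pre_get_gift_index; infer_instance
def pvWitness_get_gift_index : List (List Int) := [[1, 2], [3, 4]]

def Spec_get_gift_index (gift_status : List (List Int)) (out : List Int) : Prop := out = get_gift_index_alt gift_status
instance (gift_status : List (List Int)) (out : List Int) : Decidable (Spec_get_gift_index gift_status out) := by unfold Spec_get_gift_index; infer_instance

-- ===== CLAIM (what is proved, stated in full; the proofs are below) =====
def Claim_equal_get_gift_index : Prop := ∀ (gift_status : List (List Int)), Dom_get_gift_index gift_status → Pre_get_gift_index gift_status → Spec_get_gift_index gift_status (get_gift_index gift_status)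

-- ===== LEMMAS AND PROOFS =====

-- the antisymmetric cell difference both sides are reduced to
def pvD (g : List (List Int)) (i j : Nat) : Int :=
  (g.getD i []).getD j 0 - (g.getD j []).getD i 0

-- Common closed form: index i ↦ (sum of row i) − (sum over rows of entry i).
def pvTarget (g : List (List Int)) : List Int :=
  (List.range g.length).map (fun i => (g.getD i []).sum - (g.map (fun r => r.getD i 0)).sum)

theorem map_range_getD {α β : Type} (l : List α) (d : α) (f : α → β) :
    (List.range l.length).map (fun k => f (l.getD k d)) = l.map f := by
  apply List.ext_getElem
  · simp
  · intro i h1 h2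
    have h : i < l.length := by simpa using h2
    simp [List.getElem?_eq_getElem h]

theorem a_eq_target (g : List (List Int)) : get_gift_index g = pvTarget g := by
  unfold get_gift_index pvTarget
  simp only [PySem.List.foldl_append_singleton_eq_map, List.nil_append,
    PySem.List.pyRange_zero_nat, List.map_map]
  refine List.map_congr_left ?_
  intro i hi
  simp only [Function.comp, PySem.List.pyGetD_natCast]
  congr 1
  have hcomp : ((fun j => (PySem.List.pyGetD g j []).getD i 0) ∘ fun k : Nat => (k : Int))
      = fun k : Nat => (g.getD k []).getD i 0 := by
    funext k; simp [PySem.List.pyGetD_natCast]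
  rw [hcomp, map_range_getD g [] (fun r => r.getD i 0)]

theorem upd_len (g : List (List Int)) (o : List Int) (i j : Nat) :
    (pvUpd g o i j).length = o.length := by simp [pvUpd]

theorem set2_getD (o : List Int) (i j k : Nat) (d : Int) (hj : j < o.length) (hk : k < o.length) :
    ((o.set i (o.getD i 0 + d)).set j ((o.set i (o.getD i 0 + d)).getD j 0 - d)).getD k 0
      = o.getD k 0 + ((if i = k then d else 0) - (if j = k then d else 0)) := by
  have ho1k : ∀ m, m < o.length →
      (o.set i (o.getD i 0 + d)).getD m 0 = o.getD m 0 + (if i = m then d else 0) := by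
    intro m hm
    rw [List.getD_eq_getElem _ _ (by simpa using hm), List.getElem_set]
    by_cases h : i = m
    · subst h; simp [List.getD, List.getElem?_eq_getElem hm]
    · simp [h, List.getD, List.getElem?_eq_getElem hm]
  rw [List.getD_eq_getElem _ _ (by simpa using hk), List.getElem_set]
  by_cases h : j = k
  · subst h
    rw [if_pos rfl, ho1k j hj, if_pos rfl]
    ring
  · rw [if_neg h, ← List.getD_eq_getElem _ 0 (by simpa using hk), ho1k k hk, if_neg h]
    ring

theorem upd_getD (g : List (List Int)) (o : List Int) (i j k : Nat)
    (hj : j < o.length) (hk : k < o.length) :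
    (pvUpd g o i j).getD k 0 =
      o.getD k 0 + ((if i = k then pvD g i j else 0) - (if j = k then pvD g i j else 0)) := by
  unfold pvUpd
  simp only [PySem.List.pyGetD_natCast]
  exact set2_getD o i j k (pvD g i j) hj hk

theorem fold_upd (g : List (List Int)) (L : List (Nat × Nat)) (o : List Int)
    (hL : ∀ p ∈ L, p.2 < o.length) :
    ((L.foldl (fun o p => pvUpd g o p.1 p.2) o).length = o.length) ∧
    ∀ k < o.length, (L.foldl (fun o p => pvUpd g o p.1 p.2) o).getD k 0 =
      o.getD k 0 + (L.map (fun p =>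
        (if p.1 = k then pvD g p.1 p.2 else 0) - (if p.2 = k then pvD g p.1 p.2 else 0))).sum := by
  induction L generalizing o with
  | nil => exact ⟨rfl, fun k hk => by simp⟩
  | cons p t ih =>
    have hp : p.2 < o.length := hL p (by simp)
    have hlen : (pvUpd g o p.1 p.2).length = o.length := upd_len g o p.1 p.2
    obtain ⟨hl, he⟩ := ih (pvUpd g o p.1 p.2) (fun q hq => by rw [hlen]; exact hL q (by simp [hq]))
    refine ⟨by simpa [hlen] using hl, fun k hk => ?_⟩
    simp only [List.foldl_cons, List.map_cons, List.sum_cons]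
    rw [he k (by omega), upd_getD g o p.1 p.2 k hp hk]
    ring

theorem foldl_flatMap_pv {α β γ : Type} (l : List α) (f : α → List β) (g : γ → β → γ) (init : γ) :
    (l.flatMap f).foldl g init = l.foldl (fun acc a => (f a).foldl g acc) init := by
  induction l generalizing init with
  | nil => simp
  | cons a t ih => simp [List.foldl_append, ih]

theorem sum_map_flatMap_pv {α β : Type} (l : List α) (f : α → List β) (F : β → Int) :
    ((l.flatMap f).map F).sum = (l.map (fun a => ((f a).map F).sum)).sum := by
  induction l with
  | nil => simp
  | cons a t ih => simp [ih]

-- the upper-triangle pair list B walks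
def pvPairs (n : Nat) : List (Nat × Nat) :=
  (List.range n).flatMap (fun i => (List.range' (i + 1) (n - (i + 1))).map (fun j => (i, j)))

theorem b_as_pairs (g : List (List Int)) :
    get_gift_index_alt g =
      (pvPairs g.length).foldl (fun o p => pvUpd g o p.1 p.2) (List.replicate g.length 0) := by
  unfold get_gift_index_alt pvPairs
  rw [foldl_flatMap_pv]
  simp [List.foldl_map]

theorem sum_map_ite_pv (l : List Nat) (hl : l.Nodup) (k : Nat) (X : Int) :
    (l.map (fun j => if j = k then X else 0)).sum = if k ∈ l then X else 0 := by
  induction l with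
  | nil => simp
  | cons a t ih =>
    have hnd := (List.nodup_cons.mp hl)
    simp only [List.map_cons, List.sum_cons, ih hnd.2, List.mem_cons]
    by_cases h : a = k
    · subst h
      have : a ∉ t := hnd.1
      simp [this]
    · simp [h, Ne.symm h]

theorem sum_map_sub_pv {α : Type} (l : List α) (f h : α → Int) :
    (l.map (fun x => f x - h x)).sum = (l.map f).sum - (l.map h).sum := by
  induction l with
  | nil => simp
  | cons a t ih => simp [ih]; ring

-- the total contribution pushed onto index k by the pair walk is the full signed sum Σ_j d(k,j)
theorem pairs_sum (g : List (List Int)) (n : Nat) (k : Nat) (hk : k < n) :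
    ((pvPairs n).map (fun p =>
        (if p.1 = k then pvD g p.1 p.2 else 0) - (if p.2 = k then pvD g p.1 p.2 else 0))).sum =
      ((List.range n).map (fun j => pvD g k j)).sum := by
  obtain ⟨m, rfl⟩ : ∃ m, n = k + 1 + m := ⟨n - (k + 1), by omega⟩
  unfold pvPairs
  rw [sum_map_flatMap_pv]
  have hinner : ∀ i ∈ List.range (k + 1 + m),
      (((List.range' (i + 1) (k + 1 + m - (i + 1))).map (fun j => (i, j))).map (fun p =>
        (if p.1 = k then pvD g p.1 p.2 else 0) - (if p.2 = k then pvD g p.1 p.2 else 0))).sum =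
      if i = k then ((List.range' (k + 1) m).map (fun j => pvD g k j)).sum
      else if i < k then pvD g k i else 0 := by
    intro i hi
    have hin : i < k + 1 + m := List.mem_range.mp hi
    rw [List.map_map]
    by_cases h : i = k
    · subst h
      rw [if_pos rfl, show i + 1 + m - (i + 1) = m by omega]
      refine congrArg List.sum (List.map_congr_left ?_)
      intro j hj
      have hjk : i + 1 ≤ j := (List.mem_range'_1.mp hj).1
      have hji : ¬ j = i := by omega
      simp [Function.comp, hji]
    · rw [if_neg h]
      have heq : ((List.range' (i + 1) (k + 1 + m - (i + 1))).map
          ((fun p => (if p.1 = k then pvD g p.1 p.2 else 0) - (if p.2 = k then pvD g p.1 p.2 else 0))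
            ∘ (fun j => (i, j)))) =
          (List.range' (i + 1) (k + 1 + m - (i + 1))).map (fun j => if j = k then -(pvD g i k) else 0) := by
        refine List.map_congr_left ?_
        intro j hj
        by_cases hjk : j = k
        · subst hjk; simp [Function.comp, h]
        · simp [Function.comp, h, hjk]
      rw [heq, sum_map_ite_pv _ List.nodup_range' k]
      have hmem : k ∈ List.range' (i + 1) (k + 1 + m - (i + 1)) ↔ i < k := by
        rw [List.mem_range'_1]; omega
      by_cases hik : i < k
      · rw [if_pos (hmem.mpr hik), if_pos hik]
        unfold pvD; ring
      · rw [if_neg (fun hm2 => hik (hmem.mp hm2)), if_neg hik]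
  rw [List.map_congr_left hinner]
  have hsplit : List.range (k + 1 + m) = List.range k ++ [k] ++ List.range' (k + 1) m := by
    have h2 := List.range'_append (s := 0) (m := k + 1) (n := m) (step := 1)
    simp only [Nat.one_mul, Nat.zero_add] at h2
    rw [List.range_eq_range', ← h2, ← List.range_eq_range', List.range_succ]
  rw [hsplit]
  simp only [List.map_append, List.sum_append, List.map_cons, List.map_nil, List.sum_cons,
    List.sum_nil]
  have h1 : (List.range k).map (fun i => if i = k then
        ((List.range' (k + 1) m).map (fun j => pvD g k j)).sum
      else if i < k then pvD g k i else 0) = (List.range k).map (fun j => pvD g k j) := by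
    refine List.map_congr_left ?_
    intro i hi
    have hik := List.mem_range.mp hi
    rw [if_neg (by omega : ¬ i = k), if_pos hik]
  have h3 : (List.range' (k + 1) m).map (fun i => if i = k then
        ((List.range' (k + 1) m).map (fun j => pvD g k j)).sum
      else if i < k then pvD g k i else 0) =
      (List.range' (k + 1) m).map (fun _ => (0 : Int)) := by
    refine List.map_congr_left ?_
    intro i hi
    have hik := (List.mem_range'_1.mp hi).1
    rw [if_neg (by omega : ¬ i = k), if_neg (by omega : ¬ i < k)]
  rw [h1, h3]
  have hkk : pvD g k k = 0 := by unfold pvD; ring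
  simp [hkk]

theorem range_getD_eq (l : List Int) : (List.range l.length).map (fun j => l.getD j 0) = l := by
  apply List.ext_getElem
  · simp
  · intro i h1 h2
    have h : i < l.length := by simpa using h2
    simp [List.getElem?_eq_getElem h]

theorem b_eq_target (g : List (List Int)) (hsq : ∀ r ∈ g, r.length = g.length) :
    get_gift_index_alt g = pvTarget g := by
  rw [b_as_pairs]
  have hmem : ∀ p ∈ pvPairs g.length, p.2 < (List.replicate g.length (0 : Int)).length := by
    intro p hp
    unfold pvPairs at hp
    obtain ⟨i, hi, hp⟩ := List.mem_flatMap.mp hp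
    obtain ⟨j, hj, rfl⟩ := List.mem_map.mp hp
    have h1 := List.mem_range.mp hi
    have h2 := List.mem_range'_1.mp hj
    simp; omega
  obtain ⟨hl, he⟩ := fold_upd g (pvPairs g.length) (List.replicate g.length 0) hmem
  apply List.ext_getElem
  · simp only [pvTarget, List.length_map, List.length_range]
    simpa using hl
  · intro k h1 h2
    have hk : k < g.length := by simpa [pvTarget] using h2
    rw [← List.getD_eq_getElem _ 0 h1, he k (by simpa using hk),
      List.getD_replicate 0 (by simpa using hk), pairs_sum g g.length k hk]
    have hrow : (g.getD k []).length = g.length := by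
      have : g.getD k [] = g[k] := by simp [List.getD, List.getElem?_eq_getElem hk]
      rw [this]; exact hsq _ (List.getElem_mem hk)
    unfold pvD
    rw [sum_map_sub_pv]
    have hr : ((List.range g.length).map (fun j => (g.getD k []).getD j 0)).sum
        = (g.getD k []).sum := by
      rw [← hrow, range_getD_eq]
    have hc : ((List.range g.length).map (fun j => (g.getD j []).getD k 0)).sum
        = (g.map (fun r => r.getD k 0)).sum := by
      rw [map_range_getD g [] (fun r => r.getD k 0)]
    rw [hr, hc]
    simp [pvTarget]

-- ===== VERDICT (by name: the statement is the Claim_ definition above) =====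
theorem get_gift_index_spec : Claim_equal_get_gift_index := by
  intro g _ hpre
  unfold Spec_get_gift_index
  rw [a_eq_target, b_eq_target g hpre]
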